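-- pv_equiv track=rewrite | github.com/niclabs/robustness-and-resilience-in-graphs | auxiliaryFunctions.py | MCV
-- ===== SOURCE A (Python) =====
-- def MCV(g, mcv_covers):
--     """
--     g: Graph
--     return: The set of minimum vertex covers of G
--     """
--
--     result = []
--     min = len(mcv_covers[0])
--     for cover in mcv_covers:
--         l = len(cover)
--         if l < min:
--             min = l
--     for cover in mcv_covers:
--         if(len(cover) == min):
--             result.append(cover)
--     if not result:
--         return None
--     return result
-- ===== SOURCE B (Python) =====
-- def MCV(g, mcv_covers):
--     buckets = {}
--     for cover in mcv_covers:
--         buckets.setdefault(len(cover), []).append(cover)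
--     return buckets[min(buckets)]
-- ===== Notes on version B (the rewrite author's own statement) =====
-- stated objective: simpler
-- what changed: Replaced A's two scans (min-length pass, then filter pass) by grouping the covers into a dict keyed by length and returning the bucket of the minimum key.
-- outside the precondition, e.g. on MCV(0, []): A raises IndexError, B raises ValueError
import Mathlib
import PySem

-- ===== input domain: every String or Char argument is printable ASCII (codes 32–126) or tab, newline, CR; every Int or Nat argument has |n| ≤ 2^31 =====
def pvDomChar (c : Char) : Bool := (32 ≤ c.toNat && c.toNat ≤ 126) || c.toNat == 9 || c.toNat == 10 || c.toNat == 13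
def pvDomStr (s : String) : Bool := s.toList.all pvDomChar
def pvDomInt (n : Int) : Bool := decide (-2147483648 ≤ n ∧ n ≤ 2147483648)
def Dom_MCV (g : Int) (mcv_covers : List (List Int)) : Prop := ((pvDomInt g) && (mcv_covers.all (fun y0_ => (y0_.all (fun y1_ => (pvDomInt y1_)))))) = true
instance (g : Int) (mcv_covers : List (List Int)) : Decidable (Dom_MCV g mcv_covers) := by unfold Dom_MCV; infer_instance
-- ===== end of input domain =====

-- B replaces A's two scans (min pass, filter pass) by grouping covers into a dict keyed by length
-- and returning the bucket of the minimum key; same return value on every nonempty input.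

-- ===== PORT A =====
-- A: first pass computes the minimum length, second pass collects covers of that length.
def MCV (g : Int) (mcv_covers : List (List Int)) : Option (List (List Int)) :=
  match mcv_covers with
  | [] => none  -- Python raises IndexError here; excluded by Pre_MCV
  | c0 :: _ =>
    let min := mcv_covers.foldl
      (fun mn c => if (c.length : Int) < mn then (c.length : Int) else mn) (c0.length : Int)
    let result := mcv_covers.foldl
      (fun acc c => if (c.length : Int) = min then acc ++ [c] else acc) []
    if result.isEmpty then none else some result

-- ===== PORT B =====
-- B: group covers by length (dict bucket per length), then index by the minimum key.
-- 'buckets.setdefault(len(cover), []).append(cover)' is Dict.modify with default [];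
-- 'min(buckets)' is min? over the keys; 'buckets[m]' is get? (none = KeyError, never reached).
def MCV_alt (g : Int) (mcv_covers : List (List Int)) : Option (List (List Int)) :=
  let buckets := mcv_covers.foldl
    (fun (d : PySem.Dict Int (List (List Int))) c =>
      d.modify (c.length : Int) [] (fun v => v ++ [c]))
    PySem.Dict.empty
  match PySem.List.min? buckets.keys (fun k => k) with
  | none => none  -- empty dict: Python's min raises ValueError; excluded by Pre_MCV
  | some m => buckets.get? m

-- ===== PRECONDITION & SPEC =====
-- Pre_ excludes only the empty list, on which A raises IndexError at mcv_covers[0] (and B's min raises).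
def Pre_MCV (g : Int) (mcv_covers : List (List Int)) : Prop := mcv_covers ≠ []
instance (g : Int) (mcv_covers : List (List Int)) : Decidable (Pre_MCV g mcv_covers) := by unfold Pre_MCV; infer_instance
def pvWitness_MCV : Int × List (List Int) := (0, [[1, 2], [3]])
def Spec_MCV (g : Int) (mcv_covers : List (List Int)) (out : Option (List (List Int))) : Prop := out = MCV_alt g mcv_covers
instance (g : Int) (mcv_covers : List (List Int)) (out : Option (List (List Int))) : Decidable (Spec_MCV g mcv_covers out) := by unfold Spec_MCV; infer_instance

-- ===== CLAIM (what is proved, stated in full; the proofs are below) =====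
def Claim_equal_MCV : Prop := ∀ (g : Int) (mcv_covers : List (List Int)), Dom_MCV g mcv_covers → Pre_MCV g mcv_covers → Spec_MCV g mcv_covers (MCV g mcv_covers)

-- ===== LEMMAS AND PROOFS =====

-- the minimum-scan of A as a function
def pvMinf (l : List (List Int)) (m : Int) : Int :=
  l.foldl (fun mn c => if (c.length : Int) < mn then (c.length : Int) else mn) m

lemma pvMinf_le : ∀ (l : List (List Int)) (m : Int), pvMinf l m ≤ m := by
  intro l
  induction l with
  | nil => intro m; simp [pvMinf]
  | cons c t ih =>
    intro m
    simp only [pvMinf, List.foldl_cons]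
    by_cases h : (c.length : Int) < m
    · simp only [h, if_pos]
      exact le_trans (ih _) (le_of_lt h)
    · simp only [h, if_neg, not_false_iff]
      exact ih m

lemma pvMinf_isMin : ∀ (l : List (List Int)) (m : Int) (c : List Int),
    c ∈ l → pvMinf l m ≤ (c.length : Int) := by
  intro l
  induction l with
  | nil => intro m c hc; cases hc
  | cons a t ih =>
    intro m c hc
    rcases List.mem_cons.mp hc with rfl | hct
    · by_cases h : (c.length : Int) < m
      · have : pvMinf (c :: t) m = pvMinf t (c.length : Int) := by simp [pvMinf, h]
        rw [this]; exact pvMinf_le t _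
      · have : pvMinf (c :: t) m = pvMinf t m := by simp [pvMinf, h]
        rw [this]
        exact le_trans (pvMinf_le t m) (by omega)
    · by_cases h : (a.length : Int) < m
      · have : pvMinf (a :: t) m = pvMinf t (a.length : Int) := by simp [pvMinf, h]
        rw [this]; exact ih _ _ hct
      · have : pvMinf (a :: t) m = pvMinf t m := by simp [pvMinf, h]
        rw [this]; exact ih _ _ hct

lemma pvMinf_attained : ∀ (l : List (List Int)) (m : Int),
    pvMinf l m = m ∨ ∃ c ∈ l, (c.length : Int) = pvMinf l m := by
  intro l
  induction l with
  | nil => intro m; left; rfl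
  | cons c t ih =>
    intro m
    by_cases h : (c.length : Int) < m
    · right
      have : pvMinf (c :: t) m = pvMinf t (c.length : Int) := by
        simp [pvMinf, h]
      rw [this]
      rcases ih (c.length : Int) with h1 | ⟨d, hd, hd2⟩
      · exact ⟨c, List.mem_cons_self .., h1.symm⟩
      · exact ⟨d, List.mem_cons_of_mem _ hd, hd2⟩
    · have heq : pvMinf (c :: t) m = pvMinf t m := by simp [pvMinf, h]
      rw [heq]
      rcases ih m with h1 | ⟨d, hd, hd2⟩
      · exact Or.inl h1
      · exact Or.inr ⟨d, List.mem_cons_of_mem _ hd, hd2⟩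

-- A's second pass is filter with an accumulated prefix
lemma pvFilterFold (M : Int) : ∀ (l : List (List Int)) (acc : List (List Int)),
    l.foldl (fun acc c => if (c.length : Int) = M then acc ++ [c] else acc) acc
      = acc ++ l.filter (fun c => (c.length : Int) = M) := by
  intro l
  induction l with
  | nil => intro acc; simp
  | cons c t ih =>
    intro acc
    by_cases h : (c.length : Int) = M
    · simp [h, ih]
    · simp [h, ih]

-- B's grouping fold: each bucket is the filter of the input by its key
lemma pvBucketGetD (l : List (List Int)) (k : Int) :
    (l.foldl (fun (d : PySem.Dict Int (List (List Int))) c =>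
        d.modify (c.length : Int) [] (fun v => v ++ [c])) PySem.Dict.empty).getD k []
      = l.filter (fun c => (c.length : Int) = k) := by
  have hmap := @List.foldl_map _ _ _ (fun (c : List Int) => ((c.length : Int), c))
    (fun (d : PySem.Dict Int (List (List Int))) (p : Int × List Int) =>
      d.modify p.1 [] (fun v => v ++ [p.2])) l PySem.Dict.empty
  have h := PySem.Dict.getD_foldl_modify_append
    (l.map (fun (c : List Int) => ((c.length : Int), c))) (PySem.Dict.empty) k
  rw [hmap] at h
  simp only [h, PySem.Dict.getD_empty, List.nil_append, List.filter_map]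
  rw [show ((fun (p : Int × List Int) => p.1 == k) ∘
        fun (c : List Int) => ((c.length : Int), c)) = fun c => (c.length : Int) == k from rfl]
  rw [List.map_map]
  rw [show ((fun (p : Int × List Int) => p.2) ∘
      fun (c : List Int) => ((c.length : Int), c)) = fun c => c from rfl, List.map_id']
  apply List.filter_congr
  intro c _
  exact Bool.beq_eq_decide_eq ..

-- B's keys are the distinct lengths
lemma pvBucketKeys (l : List (List Int)) :
    (l.foldl (fun (d : PySem.Dict Int (List (List Int))) c =>
        d.modify (c.length : Int) [] (fun v => v ++ [c])) PySem.Dict.empty).keys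
      = PySem.Set.ofList (l.map (fun c => (c.length : Int))) := by
  rw [PySem.Dict.keys_foldl_modify_key]
  simp [PySem.Set.update_nil_left]

-- ===== VERDICT (by name: the statement is the Claim_ definition above) =====
theorem MCV_spec : Claim_equal_MCV := by
  intro g covers _ hpre
  unfold Spec_MCV
  match covers with
  | [] => exact absurd rfl hpre
  | c0 :: rest =>
    show MCV g (c0 :: rest) = MCV_alt g (c0 :: rest)
    simp only [MCV, MCV_alt]
    set M : Int := List.foldl
      (fun mn c => if (c.length : Int) < mn then (c.length : Int) else mn)
      (c0.length : Int) (c0 :: rest) with hMdef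
    have hM : M = pvMinf (c0 :: rest) (c0.length : Int) := rfl
    -- M is ≤ every length and is attained
    have hMle : ∀ c ∈ (c0 :: rest), M ≤ (c.length : Int) := by
      intro c hc; rw [hM]; exact pvMinf_isMin _ _ _ hc
    have hMatt : ∃ c ∈ (c0 :: rest), (c.length : Int) = M := by
      rw [hM]
      rcases pvMinf_attained (c0 :: rest) (c0.length : Int) with h1 | h2
      · exact ⟨c0, List.mem_cons_self .., h1.symm⟩
      · exact h2
    rw [pvBucketKeys, pvFilterFold M (c0 :: rest) []]
    -- B's minimum key equals M
    have hkeys_mem : ∀ k, k ∈ PySem.Set.ofList ((c0 :: rest).map (fun c => (c.length : Int))) ↔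
        ∃ c ∈ (c0 :: rest), (c.length : Int) = k := by
      intro k
      simp only [PySem.Set.mem_ofList, List.mem_map]
    have hMmem : M ∈ PySem.Set.ofList ((c0 :: rest).map (fun c => (c.length : Int))) :=
      (hkeys_mem M).mpr hMatt
    obtain ⟨m, hmin⟩ : ∃ m, PySem.List.min? (PySem.Set.ofList
        ((c0 :: rest).map (fun c => (c.length : Int)))) (fun k => k) = some m := by
      cases h : PySem.List.min? (PySem.Set.ofList
          ((c0 :: rest).map (fun c => (c.length : Int)))) (fun k => k) with
      | none =>
        rw [PySem.List.min?_eq_none_iff] at h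
        rw [h] at hMmem; cases hMmem
      | some m => exact ⟨m, rfl⟩
    have hmmem := PySem.List.min?_mem hmin
    have hmle := PySem.List.min?_isMin hmin
    have hmM : m = M := by
      rcases (hkeys_mem m).mp hmmem with ⟨c, hc, hcm⟩
      have h1 : M ≤ m := hcm ▸ hMle c hc
      have h2 : m ≤ M := hmle M hMmem
      omega
    rw [hmin, hmM]
    -- B's lookup at M is the bucket = A's filter
    have hgetD := pvBucketGetD (c0 :: rest) M
    have hcontains : ((c0 :: rest).foldl (fun (d : PySem.Dict Int (List (List Int))) c =>
        d.modify (c.length : Int) [] (fun v => v ++ [c])) PySem.Dict.empty).contains M = true := by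
      rw [PySem.Dict.contains_iff_mem_keys, pvBucketKeys]
      exact hMmem
    have hsome : (((c0 :: rest).foldl (fun (d : PySem.Dict Int (List (List Int))) c =>
        d.modify (c.length : Int) [] (fun v => v ++ [c])) PySem.Dict.empty).get? M).isSome := by
      rw [← PySem.Dict.contains_eq_isSome_get?]; exact hcontains
    obtain ⟨v, hv⟩ := Option.isSome_iff_exists.mp hsome
    have hvval : v = (c0 :: rest).filter (fun c => (c.length : Int) = M) := by
      have := PySem.Dict.getD_eq_get?_getD ((c0 :: rest).foldl
        (fun (d : PySem.Dict Int (List (List Int))) c =>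
          d.modify (c.length : Int) [] (fun v => v ++ [c])) PySem.Dict.empty) M []
      rw [hv] at this
      simp only [Option.getD_some] at this
      rw [← this, hgetD]
    -- A's filter is nonempty
    have hne : ((c0 :: rest).filter (fun c => (c.length : Int) = M)) ≠ [] := by
      rcases hMatt with ⟨c, hc, hcM⟩
      intro hcontra
      have : c ∈ (c0 :: rest).filter (fun c => (c.length : Int) = M) :=
        List.mem_filter.mpr ⟨hc, by simpa using hcM⟩
      rw [hcontra] at this; cases this
    simp only [List.nil_append]
    rw [if_neg (by simpa [List.isEmpty_iff] using hne)]
    exact (hv.trans (by rw [hvval])).symm
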